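-- pv_equiv track=rewrite | github.com/hwan1111/Coding-Test | 백준/Gold/2504. 괄호의 값/괄호의 값.py | calculate_bracket_value
-- ===== SOURCE A (Python) =====
-- def calculate_bracket_value(bracket_string):
--     stack = []
--     value = 0  # 최종 값을 저장할 변수
--     temp = 1   # 중간 계산값을 저장할 변수
--
--     for i in range(len(bracket_string)):
--         token = bracket_string[i]
--
--         if token == '(':
--             stack.append(token)
--             temp *= 2
--
--         elif token == '[':
--             stack.append(token)
--             temp *= 3
--
--         elif token == ')':
--             if not stack or stack[-1] != '(':
--                 return 0  # 올바르지 않은 괄호열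
--             if bracket_string[i - 1] == '(':
--                 value += temp
--             stack.pop()
--             temp //= 2
--
--         elif token == ']':
--             if not stack or stack[-1] != '[':
--                 return 0  # 올바르지 않은 괄호열
--             if bracket_string[i - 1] == '[':
--                 value += temp
--             stack.pop()
--             temp //= 3
--
--     # 스택이 비어있지 않으면 괄호가 완전히 짝지어지지 않음
--     if stack:
--         return 0
--
--     return value
-- ===== SOURCE B (Python) =====
-- def calculate_bracket_value(bracket_string):
--     # Value stack: markers '(' / '[' and accumulated integer pair values.
--     stack = []
--     prev = ''
--     for ch in bracket_string:
--         if ch == '(' or ch == '[':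
--             stack.append(ch)
--         elif ch == ')' or ch == ']':
--             opener = '(' if ch == ')' else '['
--             mult = 2 if ch == ')' else 3
--             total = 1 if prev == opener else 0
--             while stack and isinstance(stack[-1], int):
--                 total += stack.pop()
--             if not stack or stack[-1] != opener:
--                 return 0
--             stack.pop()
--             stack.append(mult * total)
--         prev = ch
--     if any(isinstance(x, str) for x in stack):
--         return 0
--     return sum(stack)
-- ===== Notes on version B (the rewrite author's own statement) =====
-- stated objective: alternative
-- what changed: Replaces A's running temp multiplier and global value accumulator with a single stack holding bracket markers and accumulated integer pair-values: a closing bracket pops and sums the integers on top, multiplies, and pushes the product back, and the answer is the sum of the stack at the end.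
import Mathlib
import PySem

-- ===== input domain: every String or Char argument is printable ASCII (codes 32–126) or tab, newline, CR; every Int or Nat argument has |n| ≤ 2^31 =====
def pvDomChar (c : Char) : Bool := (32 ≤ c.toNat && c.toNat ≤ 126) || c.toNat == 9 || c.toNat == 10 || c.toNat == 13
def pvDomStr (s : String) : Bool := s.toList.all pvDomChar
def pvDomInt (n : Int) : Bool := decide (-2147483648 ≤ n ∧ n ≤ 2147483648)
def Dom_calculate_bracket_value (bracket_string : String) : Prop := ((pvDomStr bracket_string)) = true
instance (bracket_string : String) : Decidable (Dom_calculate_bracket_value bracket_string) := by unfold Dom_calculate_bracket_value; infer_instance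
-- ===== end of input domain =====

-- B replaces A's running temp/value accumulators with a stack of markers and
-- accumulated integer pair-values (objective: alternative data structure).

-- ===== PORT A =====
-- Stacks are represented with the head as the top (Python appends/pops at the
-- right end; only the order of push/pop matters, which is preserved).
def loopA (s : List Char) (i : Nat) (stack : List Char) (value temp : Int) : Int :=
  if h : i < s.length then
    let token := s[i]
    if token = '(' then
      loopA s (i + 1) (token :: stack) value (temp * 2)
    else if token = '[' then
      loopA s (i + 1) (token :: stack) value (temp * 3)
    else if token = ')' then
      match stack with
      | [] => 0
      | top :: rest =>
        if top ≠ '(' then 0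
        else
          let value := if PySem.List.pyGet? s ((i : Int) - 1) = some '(' then value + temp else value
          loopA s (i + 1) rest value (PySem.Int.floordiv temp 2)
    else if token = ']' then
      match stack with
      | [] => 0
      | top :: rest =>
        if top ≠ '[' then 0
        else
          let value := if PySem.List.pyGet? s ((i : Int) - 1) = some '[' then value + temp else value
          loopA s (i + 1) rest value (PySem.Int.floordiv temp 3)
    else
      loopA s (i + 1) stack value temp
  else
    if stack ≠ [] then 0 else value
termination_by s.length - i

def calculate_bracket_value (bracket_string : String) : Int :=
  loopA bracket_string.toList 0 [] 0 1

-- ===== PORT B =====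
inductive BItem where
  | marker : Char → BItem
  | val : Int → BItem
deriving DecidableEq, Repr

-- B's inner while loop: pop the contiguous integers on top, adding them to total.
def popInts : List BItem → Int → Int × List BItem
  | BItem.val v :: rest, total => popInts rest (total + v)
  | st, total => (total, st)

def sumVals (st : List BItem) : Int :=
  st.foldr (fun it a => match it with | BItem.val v => v + a | BItem.marker _ => a) 0

def isMarker : BItem → Bool
  | BItem.marker _ => true
  | BItem.val _ => false

def loopB : List Char → Option Char → List BItem → Int
  | [], _, st => if st.any isMarker then 0 else sumVals st
  | ch :: rest, prev, st =>
    if ch = '(' ∨ ch = '[' then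
      loopB rest (some ch) (BItem.marker ch :: st)
    else if ch = ')' ∨ ch = ']' then
      let opener := if ch = ')' then '(' else '['
      let mult : Int := if ch = ')' then 2 else 3
      let base : Int := if prev = some opener then 1 else 0
      match popInts st base with
      | (total, BItem.marker c :: rest') =>
        if c = opener then loopB rest (some ch) (BItem.val (mult * total) :: rest') else 0
      | (_, _) => 0
    else
      loopB rest (some ch) st

def calculate_bracket_value_alt (bracket_string : String) : Int :=
  loopB bracket_string.toList none []

-- ===== PRECONDITION & SPEC =====
def Spec_calculate_bracket_value (bracket_string : String) (out : Int) : Prop := out = calculate_bracket_value_alt bracket_string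
instance (bracket_string : String) (out : Int) : Decidable (Spec_calculate_bracket_value bracket_string out) := by unfold Spec_calculate_bracket_value; infer_instance

-- ===== CLAIM (what is proved, stated in full; the proofs are below) =====
def Claim_equal_calculate_bracket_value : Prop := ∀ (bracket_string : String), Dom_calculate_bracket_value bracket_string → Spec_calculate_bracket_value bracket_string (calculate_bracket_value bracket_string)

-- ===== LEMMAS AND PROOFS =====

def markersOf : List BItem → List Char
  | [] => []
  | BItem.marker c :: rest => c :: markersOf rest
  | BItem.val _ :: rest => markersOf rest

def multOf (c : Char) : Int := if c = '(' then 2 else 3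

def prodM : List Char → Int
  | [] => 1
  | c :: rest => multOf c * prodM rest

-- weighted sum of the integer entries: each is multiplied by the product of
-- the multipliers of the markers below it
def sumW : List BItem → Int
  | [] => 0
  | BItem.marker _ :: rest => sumW rest
  | BItem.val v :: rest => v * prodM (markersOf rest) + sumW rest

-- leading integer values and the remainder (first marker onwards)
def valsSum : List BItem → Int
  | BItem.val v :: rest => v + valsSum rest
  | _ => 0

def dropVals : List BItem → List BItem
  | BItem.val _ :: rest => dropVals rest
  | st => st

lemma popInts_eq : ∀ (st : List BItem) (b : Int), popInts st b = (b + valsSum st, dropVals st) := by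
  intro st
  induction st with
  | nil => intro b; simp [popInts, valsSum, dropVals]
  | cons x rest ih =>
    intro b
    cases x with
    | marker c => simp [popInts, valsSum, dropVals]
    | val v => simp [popInts, valsSum, dropVals, ih]; ring

lemma markersOf_dropVals (st : List BItem) : markersOf (dropVals st) = markersOf st := by
  induction st with
  | nil => simp [dropVals]
  | cons x rest ih =>
    cases x with
    | marker c => simp [dropVals]
    | val v => simpa [dropVals, markersOf] using ih

lemma dropVals_shape (st : List BItem) :
    dropVals st = [] ∨ ∃ c t, dropVals st = BItem.marker c :: t := by
  induction st with
  | nil => left; simp [dropVals]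
  | cons x rest ih =>
    cases x with
    | marker c => right; exact ⟨c, rest, by simp [dropVals]⟩
    | val v => simpa [dropVals] using ih

lemma sumW_decomp (st : List BItem) :
    sumW st = valsSum st * prodM (markersOf st) + sumW (dropVals st) := by
  induction st with
  | nil => simp [sumW, valsSum, dropVals]
  | cons x rest ih =>
    cases x with
    | marker c => simp [sumW, valsSum, dropVals, markersOf]
    | val v =>
      simp [sumW, valsSum, dropVals, markersOf, ih]; ring

lemma sumW_no_markers (st : List BItem) (h : markersOf st = []) : sumW st = sumVals st := by
  induction st with
  | nil => simp [sumW, sumVals]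
  | cons x rest ih =>
    cases x with
    | marker c => simp [markersOf] at h
    | val v =>
      rw [markersOf] at h
      simp [sumW, sumVals, h, prodM, ih h]

lemma any_isMarker_iff (st : List BItem) : st.any isMarker = true ↔ markersOf st ≠ [] := by
  induction st with
  | nil => simp [markersOf]
  | cons x rest ih =>
    cases x with
    | marker c => simp [isMarker, markersOf]
    | val v => simpa [isMarker, markersOf] using ih

def prevOf (s : List Char) (i : Nat) : Option Char :=
  if h : 0 < i ∧ i - 1 < s.length then some s[i - 1] else none

lemma dropVals_of_markers_nil (st : List BItem) (h : markersOf st = []) : dropVals st = [] := by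
  rcases dropVals_shape st with h0 | ⟨c, t, h0⟩
  · exact h0
  · have := markersOf_dropVals st
    rw [h0, h] at this
    simp [markersOf] at this

lemma sim (s : List Char) : ∀ (n i : Nat) (st : List BItem),
    s.length - i = n → (markersOf st).length ≤ i →
    loopA s i (markersOf st) (sumW st) (prodM (markersOf st)) = loopB (s.drop i) (prevOf s i) st := by
  intro n
  induction n with
  | zero =>
    intro i st hn hm
    have hle : s.length ≤ i := by omega
    rw [loopA.eq_def]
    simp only [dif_neg (by omega : ¬ i < s.length)]
    rw [List.drop_eq_nil_of_le hle, loopB]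
    by_cases hM : markersOf st = []
    · simp [hM, (any_isMarker_iff st), sumW_no_markers st hM]
    · simp [hM, (any_isMarker_iff st).2 hM]
  | succ n ih =>
    intro i st hn hm
    have hi : i < s.length := by omega
    rw [loopA.eq_def]
    simp only [dif_pos hi]
    rw [List.drop_eq_getElem_cons hi, loopB]
    have hprev : prevOf s (i + 1) = some s[i] := by
      unfold prevOf
      rw [dif_pos ⟨Nat.succ_pos i, by omega⟩]
      simp
    by_cases h1 : s[i] = '('
    · -- open paren: both push a marker
      have hIH := ih (i + 1) (BItem.marker '(' :: st) (by omega) (by simp [markersOf]; omega)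
      rw [hprev, h1] at hIH
      simp only [markersOf, sumW, prodM, multOf] at hIH
      simp only [h1]
      simp only [reduceIte, true_or] at hIH ⊢
      rw [mul_comm (prodM (markersOf st)) 2]
      exact hIH
    by_cases h2 : s[i] = '['
    · have hIH := ih (i + 1) (BItem.marker '[' :: st) (by omega) (by simp [markersOf]; omega)
      rw [hprev, h2] at hIH
      simp only [markersOf, sumW, prodM, multOf] at hIH
      simp only [h2]
      simp only [Char.reduceEq, or_true, if_true] at hIH ⊢
      rw [mul_comm (prodM (markersOf st)) 3]
      exact hIH
    by_cases h3 : s[i] = ')'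
    · -- closing round bracket
      simp only [h3, Char.reduceEq, or_false, if_true, if_false, popInts_eq]
      rcases hM : markersOf st with _ | ⟨c, ms⟩
      · -- no marker anywhere: both sides are 0
        rw [dropVals_of_markers_nil st hM]
      · obtain ⟨c', t, hd⟩ : ∃ c' t, dropVals st = BItem.marker c' :: t := by
          rcases dropVals_shape st with h0 | h0
          · have := markersOf_dropVals st; rw [h0, hM] at this; simp [markersOf] at this
          · exact h0
        have hmk : markersOf (dropVals st) = markersOf st := markersOf_dropVals st
        rw [hd, hM] at hmk
        simp only [markersOf] at hmk
        have hc : c' = c := by injection hmk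
        subst hc
        have ht : markersOf t = ms := by injection hmk
        rw [hd]
        by_cases hop : c' = '('
        · subst hop
          simp only [reduceIte]
          -- the stack is nonempty, so i ≥ 1 and both sides look at s[i-1]
          have hi1 : 1 ≤ i := by rw [hM] at hm; simp at hm; omega
          have hget : PySem.List.pyGet? s ((i : Int) - 1) = some s[i - 1] := by
            have hcast : ((i : Int) - 1) = ((i - 1 : Nat) : Int) := by omega
            rw [hcast, PySem.List.pyGet?_natCast]
            simp [List.getElem?_eq_getElem (by omega : i - 1 < s.length)]
          have hprevi : prevOf s i = some s[i - 1] := by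
            unfold prevOf
            rw [dif_pos ⟨by omega, by omega⟩]
          set base : Int := if prevOf s i = some '(' then (1 : Int) else 0 with hbase
          have hcond : (if PySem.List.pyGet? s ((i : Int) - 1) = some '('
              then sumW st + prodM (markersOf st) else sumW st)
              = sumW st + base * prodM (markersOf st) := by
            rw [hget, hbase, hprevi]
            by_cases hpc : s[i - 1] = '(' <;> simp [hpc]
          have hIH := ih (i + 1) (BItem.val (2 * (base + valsSum st)) :: t) (by omega)
            (by simp only [markersOf, ht]; rw [hM] at hm; simp at hm; omega)
          rw [hprev, h3] at hIH
          simp only [markersOf, sumW, ht] at hIH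
          have hsum : sumW st + base * prodM (markersOf st)
              = 2 * (base + valsSum st) * prodM ms + sumW t := by
            have hdec := sumW_decomp st
            have hsw : sumW (dropVals st) = sumW t := by rw [hd]; simp [sumW]
            rw [hdec, hsw, hM]
            simp only [prodM, multOf, reduceIte]
            ring
          have hdiv : PySem.Int.floordiv (prodM (markersOf st)) 2 = prodM ms := by
            rw [hM]
            simp only [prodM, multOf, reduceIte]
            rw [PySem.Int.floordiv_eq_ediv_of_pos (by norm_num)]
            omega
          rw [hM] at hcond hsum hdiv
          rw [hcond, hsum, hdiv]
          exact hIH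
        · simp [hop]
    by_cases h4 : s[i] = ']'
    · -- closing square bracket (mirror of the round case)
      simp only [h4, Char.reduceEq, or_true, or_false, if_true, if_false, popInts_eq]
      rcases hM : markersOf st with _ | ⟨c, ms⟩
      · rw [dropVals_of_markers_nil st hM]
      · obtain ⟨c', t, hd⟩ : ∃ c' t, dropVals st = BItem.marker c' :: t := by
          rcases dropVals_shape st with h0 | h0
          · have := markersOf_dropVals st; rw [h0, hM] at this; simp [markersOf] at this
          · exact h0
        have hmk : markersOf (dropVals st) = markersOf st := markersOf_dropVals st
        rw [hd, hM] at hmk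
        simp only [markersOf] at hmk
        have hc : c' = c := by injection hmk
        subst hc
        have ht : markersOf t = ms := by injection hmk
        rw [hd]
        by_cases hop : c' = '['
        · subst hop
          simp only [reduceIte]
          have hi1 : 1 ≤ i := by rw [hM] at hm; simp at hm; omega
          have hget : PySem.List.pyGet? s ((i : Int) - 1) = some s[i - 1] := by
            have hcast : ((i : Int) - 1) = ((i - 1 : Nat) : Int) := by omega
            rw [hcast, PySem.List.pyGet?_natCast]
            simp [List.getElem?_eq_getElem (by omega : i - 1 < s.length)]
          have hprevi : prevOf s i = some s[i - 1] := by
            unfold prevOf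
            rw [dif_pos ⟨by omega, by omega⟩]
          set base : Int := if prevOf s i = some '[' then (1 : Int) else 0 with hbase
          have hcond : (if PySem.List.pyGet? s ((i : Int) - 1) = some '['
              then sumW st + prodM (markersOf st) else sumW st)
              = sumW st + base * prodM (markersOf st) := by
            rw [hget, hbase, hprevi]
            by_cases hpc : s[i - 1] = '[' <;> simp [hpc]
          have hIH := ih (i + 1) (BItem.val (3 * (base + valsSum st)) :: t) (by omega)
            (by simp only [markersOf, ht]; rw [hM] at hm; simp at hm; omega)
          rw [hprev, h4] at hIH
          simp only [markersOf, sumW, ht] at hIH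
          have hsum : sumW st + base * prodM (markersOf st)
              = 3 * (base + valsSum st) * prodM ms + sumW t := by
            have hdec := sumW_decomp st
            have hsw : sumW (dropVals st) = sumW t := by rw [hd]; simp [sumW]
            rw [hdec, hsw, hM]
            simp only [prodM, multOf, Char.reduceEq, reduceIte]
            ring
          have hdiv : PySem.Int.floordiv (prodM (markersOf st)) 3 = prodM ms := by
            rw [hM]
            simp only [prodM, multOf, Char.reduceEq, reduceIte]
            rw [PySem.Int.floordiv_eq_ediv_of_pos (by norm_num)]
            omega
          rw [hM] at hcond hsum hdiv
          rw [hcond, hsum, hdiv]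
          exact hIH
        · simp [hop]
    · -- any other character is skipped by both programs
      have hIH := ih (i + 1) st (by omega) (by omega)
      rw [hprev] at hIH
      simp only [if_neg h1, if_neg h2, if_neg h3, if_neg h4,
        if_neg (by simp [h1, h2] : ¬ (s[i] = '(' ∨ s[i] = '[')),
        if_neg (by simp [h3, h4] : ¬ (s[i] = ')' ∨ s[i] = ']'))]
      exact hIH

-- ===== VERDICT (by name: the statement is the Claim_ definition above) =====
theorem calculate_bracket_value_spec : Claim_equal_calculate_bracket_value := by
  intro s _
  unfold Spec_calculate_bracket_value calculate_bracket_value calculate_bracket_value_alt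
  have h := sim s.toList s.toList.length 0 [] (by omega) (by simp [markersOf])
  simpa [markersOf, sumW, prodM, prevOf] using h
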